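-- pv_equiv track=rewrite | github.com/BoudewijnKlijn/competitive_programming | adventofcode/2018/d6/d6_part2.py | get_size_safe_region
-- ===== SOURCE A (Python) =====
-- def get_boundaries(contents, offset=0):
--     min_x, max_x, min_y, max_y = None, None, None, None
--     for x, y in contents:
--         if min_x is None or x < min_x:
--             min_x = x
--         elif max_x is None or x > max_x:
--             max_x = x
--
--         if min_y is None or y < min_y:
--             min_y = y
--         elif max_y is None or y > max_y:
--             max_y = y
--
--     return min_x - offset, max_x + offset, min_y - offset, max_y + offset
--
-- def get_distance(x1, y1, x2, y2):
--     return abs(x1 - x2) + abs(y1 - y2)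
--
-- def get_size_safe_region(centers):
--     areas = {i: {'center_x': x, 'center_y': y, 'size': 0} for i, (x, y) in enumerate(centers)}
--
--     min_x, max_x, min_y, max_y = get_boundaries(centers)
--     width = max_x - min_x + 1
--     height = max_y - min_y + 1
--
--     safe_region_size = 0
--     total_distance_threshold = 10000
--     for row in range(width):
--         x = row + min_x
--         for col in range(height):
--             y = col + min_y
--
--             total_distance = 0
--             for center in areas:
--                 distance = get_distance(x, y, areas[center]['center_x'], areas[center]['center_y'])
--                 total_distance += distance
--
--             if total_distance < total_distance_threshold:
--                 safe_region_size += 1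
--
--     return safe_region_size
-- ===== SOURCE B (Python) =====
-- def get_boundaries(contents, offset=0):
--     # module helper reused unchanged from the original file
--     min_x, max_x, min_y, max_y = None, None, None, None
--     for x, y in contents:
--         if min_x is None or x < min_x:
--             min_x = x
--         elif max_x is None or x > max_x:
--             max_x = x
--
--         if min_y is None or y < min_y:
--             min_y = y
--         elif max_y is None or y > max_y:
--             max_y = y
--
--     return min_x - offset, max_x + offset, min_y - offset, max_y + offset
--
--
-- def get_size_safe_region(centers):
--     min_x, max_x, min_y, max_y = get_boundaries(centers)
--     xs = [c[0] for c in centers]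
--     ys = [c[1] for c in centers]
--     # Manhattan distance separates per axis: precompute each column's y-distance
--     # sum once and each row's x-distance sum once, instead of re-scanning all
--     # centers for every cell.
--     col_sums = [sum(abs(y - cy) for cy in ys) for y in range(min_y, max_y + 1)]
--     count = 0
--     for x in range(min_x, max_x + 1):
--         sx = sum(abs(x - cx) for cx in xs)
--         count += sum(1 for sy in col_sums if sx + sy < 10000)
--     return count
-- ===== Notes on version B (the rewrite author's own statement) =====
-- stated objective: faster
-- what changed: B keeps the module's get_boundaries helper (same bounding box) but separates the Manhattan-distance sum into per-row and per-column distance sums computed once per coordinate, replacing A's triple loop that re-scans all N centers for every grid cell.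
import Mathlib
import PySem

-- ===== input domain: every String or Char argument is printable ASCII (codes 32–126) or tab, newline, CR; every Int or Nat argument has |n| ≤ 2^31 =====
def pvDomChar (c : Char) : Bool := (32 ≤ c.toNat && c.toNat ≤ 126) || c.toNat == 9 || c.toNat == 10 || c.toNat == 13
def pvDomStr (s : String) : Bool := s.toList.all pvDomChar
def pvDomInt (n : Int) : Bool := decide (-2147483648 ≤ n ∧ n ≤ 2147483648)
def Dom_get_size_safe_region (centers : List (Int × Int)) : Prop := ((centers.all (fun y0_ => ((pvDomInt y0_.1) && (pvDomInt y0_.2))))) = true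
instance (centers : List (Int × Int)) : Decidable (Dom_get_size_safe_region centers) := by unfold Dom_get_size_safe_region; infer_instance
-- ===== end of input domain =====

-- B keeps the module's get_boundaries helper but replaces A's triple loop (which re-scans
-- every center for every grid cell) by per-row and per-column Manhattan-distance sums.

-- ===== PORT A =====
def get_distance (x1 y1 x2 y2 : Int) : Int := |x1 - x2| + |y1 - y2|

-- one step of get_boundaries' loop for one coordinate: 'if mn is None or v < mn: mn = v
-- elif mx is None or v > mx: mx = v'
def pvBRStep (s : Option Int × Option Int) (v : Int) : Option Int × Option Int :=
  match s with
  | (none, omax) => (some v, omax)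
  | (some mn, omax) =>
    if v < mn then (some v, omax)
    else
      match omax with
      | none => (some mn, some v)
      | some mx => if v > mx then (some mn, some v) else (some mn, some mx)

def get_boundaries (contents : List (Int × Int)) (offset : Int) : Option (Int × Int × Int × Int) :=
  let st := contents.foldl
    (fun (s : (Option Int × Option Int) × (Option Int × Option Int)) c =>
      (pvBRStep s.1 c.1, pvBRStep s.2 c.2)) ((none, none), (none, none))
  match st with
  | ((some mnx, some mxx), (some mny, some mxy)) =>
      some (mnx - offset, mxx + offset, mny - offset, mxy + offset)
  | _ => none  -- Python raises TypeError here (arithmetic on None); excluded by Pre_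

def get_size_safe_region (centers : List (Int × Int)) : Int :=
  -- areas = {i: {'center_x': x, 'center_y': y, 'size': 0} for i, (x, y) in enumerate(centers)}:
  -- the dict is iterated in key (= insertion) order and only looked up at the iterated key,
  -- so it is the enumerate association list (keys 0..n-1 are distinct).
  let areas := PySem.List.enumerate centers 0
  match get_boundaries centers 0 with
  | none => 0  -- unreachable under Pre_ (Python raises TypeError)
  | some (min_x, max_x, min_y, max_y) =>
    let width := max_x - min_x + 1
    let height := max_y - min_y + 1
    (PySem.List.pyRange 0 width 1).foldl (fun safe row =>
      let x := row + min_x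
      (PySem.List.pyRange 0 height 1).foldl (fun safe2 col =>
        let y := col + min_y
        let total := areas.foldl (fun t p => t + get_distance x y p.2.1 p.2.2) 0
        if total < 10000 then safe2 + 1 else safe2) safe) 0

-- ===== PORT B =====
def get_size_safe_region_alt (centers : List (Int × Int)) : Int :=
  match get_boundaries centers 0 with
  | none => 0  -- unreachable under Pre_ (get_boundaries raises TypeError in Python)
  | some (min_x, max_x, min_y, max_y) =>
    let xs := centers.map (fun c => c.1)
    let ys := centers.map (fun c => c.2)
    let colSums := (PySem.List.pyRange min_y (max_y + 1) 1).map
      (fun y => (ys.map (fun cy => |y - cy|)).sum)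
    (PySem.List.pyRange min_x (max_x + 1) 1).foldl (fun count x =>
      let sx := (xs.map (fun cx => |x - cx|)).sum
      count + colSums.foldl (fun k sy => if sx + sy < 10000 then k + 1 else k) 0) 0

-- ===== PRECONDITION & SPEC =====
-- strictly decreasing coordinate list (trivially true for [] and singletons)
def pvSDec (l : List Int) : Prop := l.IsChain (fun a b => b < a)

-- Pre_ excludes exactly the inputs on which A raises TypeError: get_boundaries leaves
-- max_x (resp. max_y) = None iff the x- (resp. y-) coordinates are strictly decreasing
-- (including the empty list and a single center), and then 'max_x + offset' raises.
-- B raises there too (same helper).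
def Pre_get_size_safe_region (centers : List (Int × Int)) : Prop :=
  ¬ pvSDec (centers.map (fun c => c.1)) ∧ ¬ pvSDec (centers.map (fun c => c.2))

instance (centers : List (Int × Int)) : Decidable (Pre_get_size_safe_region centers) := by
  unfold Pre_get_size_safe_region pvSDec; infer_instance

def pvWitness_get_size_safe_region : (List (Int × Int)) := [(0, 0), (1, 1)]

def Spec_get_size_safe_region (centers : List (Int × Int)) (out : Int) : Prop :=
  out = get_size_safe_region_alt centers

instance (centers : List (Int × Int)) (out : Int) : Decidable (Spec_get_size_safe_region centers out) := by
  unfold Spec_get_size_safe_region; infer_instance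

-- ===== CLAIM (what is proved, stated in full; the proofs are below) =====
def Claim_equal_get_size_safe_region : Prop := ∀ (centers : List (Int × Int)), Dom_get_size_safe_region centers → Pre_get_size_safe_region centers → Spec_get_size_safe_region centers (get_size_safe_region centers)

-- ===== LEMMAS AND PROOFS =====

-- sum of distances to the centers' x-coordinates (resp. y-coordinates)
def pvS (centers : List (Int × Int)) (x : Int) : Int := (centers.map (fun c => |x - c.1|)).sum
def pvT (centers : List (Int × Int)) (y : Int) : Int := (centers.map (fun c => |y - c.2|)).sum

lemma pvS_eq (centers : List (Int × Int)) (x : Int) :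
    ((centers.map (fun c => c.1)).map (fun cx => |x - cx|)).sum = pvS centers x := by
  rw [List.map_map]; rfl

lemma pvT_eq (centers : List (Int × Int)) (y : Int) :
    ((centers.map (fun c => c.2)).map (fun cy => |y - cy|)).sum = pvT centers y := by
  rw [List.map_map]; rfl

lemma pvBR_min (l : List Int) (mn : Int) (om : Option Int) :
    (l.foldl pvBRStep (some mn, om)).1 = some (l.foldl min mn) := by
  induction l generalizing mn om with
  | nil => rfl
  | cons a l ih =>
    simp only [List.foldl_cons]
    by_cases h : a < mn
    · rw [show pvBRStep (some mn, om) a = (some a, om) from by simp [pvBRStep, h]]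
      rw [min_eq_right h.le]
      exact ih a om
    · have hstep : ∃ om', pvBRStep (some mn, om) a = (some mn, om') := by
        cases om with
        | none => exact ⟨some a, by simp [pvBRStep, h]⟩
        | some mx =>
          by_cases h2 : mx < a
          · exact ⟨some a, by simp [pvBRStep, h, h2]⟩
          · exact ⟨some mx, by simp [pvBRStep, h, h2]⟩
      obtain ⟨om', hom'⟩ := hstep
      rw [hom', min_eq_left (not_lt.mp h)]
      exact ih mn om'

lemma pvBR_snd_some (l : List Int) : ∀ (mn mx : Int),
    ∃ mx', (l.foldl pvBRStep (some mn, some mx)).2 = some mx' := by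
  induction l with
  | nil => intro mn mx; exact ⟨mx, rfl⟩
  | cons a l ih =>
    intro mn mx
    simp only [List.foldl_cons]
    by_cases h : a < mn
    · rw [show pvBRStep (some mn, some mx) a = (some a, some mx) from by simp [pvBRStep, h]]
      exact ih a mx
    · by_cases h2 : mx < a
      · rw [show pvBRStep (some mn, some mx) a = (some mn, some a) from by simp [pvBRStep, h, h2]]
        exact ih mn a
      · rw [show pvBRStep (some mn, some mx) a = (some mn, some mx) from by simp [pvBRStep, h, h2]]
        exact ih mn mx

lemma pvBR_snd_none (l : List Int) : ∀ (mn : Int),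
    (l.foldl pvBRStep (some mn, none)).2 = none → List.IsChain (fun a b => b < a) (mn :: l) := by
  induction l with
  | nil => intro mn _; exact List.IsChain.singleton mn
  | cons a l ih =>
    intro mn h
    rw [List.foldl_cons] at h
    by_cases hc : a < mn
    · rw [show pvBRStep (some mn, none) a = (some a, none) from by simp [pvBRStep, hc]] at h
      exact List.isChain_cons_cons.mpr ⟨hc, ih a h⟩
    · exfalso
      rw [show pvBRStep (some mn, none) a = (some mn, some a) from by simp [pvBRStep, hc]] at h
      obtain ⟨mx', hmx'⟩ := pvBR_snd_some l mn a
      rw [hmx'] at h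
      exact Option.some_ne_none _ h

-- under Pre_ get_boundaries returns a value (in Python: does not raise)
lemma pvBoundariesSome (centers : List (Int × Int))
    (hpre : Pre_get_size_safe_region centers) :
    ∃ mnx mxx mny mxy, get_boundaries centers 0 = some (mnx, mxx, mny, mxy) := by
  obtain ⟨hpx, hpy⟩ := hpre
  cases centers with
  | nil => exact absurd List.IsChain.nil hpx
  | cons c t =>
    unfold get_boundaries
    simp only [List.foldl_cons]
    rw [show (pvBRStep (none, none) c.1, pvBRStep (none, none) c.2)
        = (((some c.1, none) : Option Int × Option Int),
           ((some c.2, none) : Option Int × Option Int)) from rfl]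
    rw [PySem.List.foldl_prod_mk (f := fun s (p : Int × Int) => pvBRStep s p.1)
        (g := fun s (p : Int × Int) => pvBRStep s p.2)]
    rw [show (t.foldl (fun s (p : Int × Int) => pvBRStep s p.1) (some c.1, none))
        = ((t.map (fun p : Int × Int => p.1)).foldl pvBRStep (some c.1, none)) from
        List.foldl_map.symm,
      show (t.foldl (fun s (p : Int × Int) => pvBRStep s p.2) (some c.2, none))
        = ((t.map (fun p : Int × Int => p.2)).foldl pvBRStep (some c.2, none)) from
        List.foldl_map.symm]
    have hx2 : ∃ mx, ((t.map (fun p : Int × Int => p.1)).foldl pvBRStep (some c.1, none)).2 = some mx := by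
      cases hcase : ((t.map (fun p : Int × Int => p.1)).foldl pvBRStep (some c.1, none)).2 with
      | none => exact absurd (by simpa using pvBR_snd_none _ c.1 hcase) hpx
      | some mx => exact ⟨mx, rfl⟩
    have hy2 : ∃ my, ((t.map (fun p : Int × Int => p.2)).foldl pvBRStep (some c.2, none)).2 = some my := by
      cases hcase : ((t.map (fun p : Int × Int => p.2)).foldl pvBRStep (some c.2, none)).2 with
      | none => exact absurd (by simpa using pvBR_snd_none _ c.2 hcase) hpy
      | some my => exact ⟨my, rfl⟩
    obtain ⟨mx, hx2⟩ := hx2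
    obtain ⟨my, hy2⟩ := hy2
    have h1 : (t.map (fun p : Int × Int => p.1)).foldl pvBRStep (some c.1, none)
        = (some ((t.map (fun p : Int × Int => p.1)).foldl min c.1), some mx) :=
      Prod.ext_iff.mpr ⟨pvBR_min _ _ _, hx2⟩
    have h2 : (t.map (fun p : Int × Int => p.2)).foldl pvBRStep (some c.2, none)
        = (some ((t.map (fun p : Int × Int => p.2)).foldl min c.2), some my) :=
      Prod.ext_iff.mpr ⟨pvBR_min _ _ _, hy2⟩
    rw [h1, h2]
    exact ⟨_, _, _, _, rfl⟩

lemma pvSumDist (centers : List (Int × Int)) (x y : Int) : ∀ (st init : Int),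
    (PySem.List.enumerate centers st).foldl
      (fun t p => t + get_distance x y p.2.1 p.2.2) init
    = init + (pvS centers x + pvT centers y) := by
  induction centers with
  | nil => intro st init; simp [PySem.List.enumerate_nil, pvS, pvT]
  | cons c t ih =>
    intro st init
    rw [PySem.List.enumerate_cons, List.foldl_cons, ih]
    unfold pvS pvT get_distance
    simp only [List.map_cons, List.sum_cons]
    ring

lemma pvSumShift (S T : Int → Int) (mnx Mx mny My : Int) :
    ((PySem.List.pyRange 0 (Mx - mnx + 1) 1).map (fun r =>
       (((PySem.List.pyRange 0 (My - mny + 1) 1).countP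
          (fun cc => decide (S (r + mnx) + T (cc + mny) < 10000))) : Int))).sum
  = ((PySem.List.pyRange mnx (Mx + 1) 1).map (fun x =>
       (((PySem.List.pyRange mny (My + 1) 1).countP
          (fun y => decide (S x + T y < 10000))) : Int))).sum := by
  rw [PySem.List.pyRange_one 0 (Mx - mnx + 1), PySem.List.pyRange_one mnx (Mx + 1),
      PySem.List.pyRange_one 0 (My - mny + 1), PySem.List.pyRange_one mny (My + 1)]
  rw [show (Mx - mnx + 1 - 0).toNat = (Mx + 1 - mnx).toNat from by omega,
      show (My - mny + 1 - 0).toNat = (My + 1 - mny).toNat from by omega]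
  rw [List.map_map, List.map_map]
  refine congrArg List.sum (List.map_congr_left ?_)
  intro r _
  simp only [Function.comp_def]
  rw [List.countP_map, List.countP_map]
  congr 1
  refine List.countP_congr ?_
  intro k _
  simp only [Function.comp_def]
  rw [show ((0 : Int) + (k : Int)) + mny = mny + (k : Int) from by ring,
      show ((0 : Int) + (r : Int)) + mnx = mnx + (r : Int) from by ring]

-- ===== VERDICT (by name: the statement is the Claim_ definition above) =====
theorem get_size_safe_region_spec : Claim_equal_get_size_safe_region := by
  intro centers hdom hpre
  obtain ⟨mnx, mxx, mny, mxy, hb⟩ := pvBoundariesSome centers hpre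
  show get_size_safe_region centers = get_size_safe_region_alt centers
  unfold get_size_safe_region get_size_safe_region_alt
  rw [hb]
  simp only [pvSumDist, zero_add, pvS_eq, pvT_eq]
  simp only [PySem.List.foldl_ite_add_one, PySem.List.foldl_add, List.countP_map]
  simp only [Function.comp_def, zero_add]
  exact pvSumShift (pvS centers) (pvT centers) mnx mxx mny mxy
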